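-- pv_equiv track=rewrite | github.com/msp-vibe-coder/veeam-audit | scripts/fetch_wasabi_utilization.py | deduplicate_by_bucket
-- ===== SOURCE A (Python) =====
-- def deduplicate_by_bucket(records):
--     latest_by_bucket = {}
--     for record in records:
--         bucket = record.get("Bucket", "")
--         start_time = record.get("StartTime", "")
--         if bucket not in latest_by_bucket or start_time > latest_by_bucket[bucket].get("StartTime", ""):
--             latest_by_bucket[bucket] = record
--     return list(latest_by_bucket.values())
-- ===== SOURCE B (Python) =====
-- def deduplicate_by_bucket(records):
--     groups = {}
--     for record in records:
--         groups.setdefault(record.get("Bucket", ""), []).append(record)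
--     return [max(recs, key=lambda r: r.get("StartTime", ""))
--             for recs in groups.values()]
-- ===== Notes on version B (the rewrite author's own statement) =====
-- stated objective: alternative
-- what changed: Replaces the streaming running-max (compare-and-overwrite per record) with a two-phase group-then-reduce: first group records into per-bucket lists in first-appearance order, then pick each group's first maximal record by StartTime with builtin max.
import Mathlib
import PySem

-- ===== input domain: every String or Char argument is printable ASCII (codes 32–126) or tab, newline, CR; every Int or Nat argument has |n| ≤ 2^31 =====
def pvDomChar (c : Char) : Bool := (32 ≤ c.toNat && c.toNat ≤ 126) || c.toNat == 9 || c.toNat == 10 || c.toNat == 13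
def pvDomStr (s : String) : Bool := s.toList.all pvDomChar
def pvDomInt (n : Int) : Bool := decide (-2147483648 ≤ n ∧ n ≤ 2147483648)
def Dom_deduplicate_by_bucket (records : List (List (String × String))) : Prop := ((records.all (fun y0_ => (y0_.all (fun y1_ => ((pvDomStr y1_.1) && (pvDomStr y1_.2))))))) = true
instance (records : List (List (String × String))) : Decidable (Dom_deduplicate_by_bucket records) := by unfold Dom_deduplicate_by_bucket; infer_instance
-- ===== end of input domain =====

-- B replaces A's streaming compare-and-overwrite running max with a two-phase
-- group-by-bucket then reduce-with-max; same result, stated objective: alternative.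

-- record.get(key, "") — a record is a Python dict, here an association list
def recGet (r : List (String × String)) (k : String) : String :=
  (PySem.Dict.mk r).getD k ""

-- ===== PORT A =====
def deduplicate_by_bucket (records : List (List (String × String))) : List (List (String × String)) :=
  (records.foldl (fun latest record =>
      let bucket := recGet record "Bucket"
      let start_time := recGet record "StartTime"
      match latest.get? bucket with
      | none => latest.insert bucket record
      | some prev => if recGet prev "StartTime" < start_time then latest.insert bucket record else latest)
    PySem.Dict.empty).values

-- ===== PORT B =====
def deduplicate_by_bucket_alt (records : List (List (String × String))) : List (List (String × String)) :=
  let groups : PySem.Dict String (List (List (String × String))) :=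
    records.foldl (fun g record => g.modify (recGet record "Bucket") [] (· ++ [record])) PySem.Dict.empty
  groups.values.map (fun recs => (PySem.List.max? recs (fun r => recGet r "StartTime")).getD [])

-- ===== PRECONDITION & SPEC =====
def Spec_deduplicate_by_bucket (records : List (List (String × String))) (out : List (List (String × String))) : Prop := out = deduplicate_by_bucket_alt records
instance (records : List (List (String × String))) (out : List (List (String × String))) : Decidable (Spec_deduplicate_by_bucket records out) := by unfold Spec_deduplicate_by_bucket; infer_instance

-- ===== CLAIM (what is proved, stated in full; the proofs are below) =====
def Claim_equal_deduplicate_by_bucket : Prop := ∀ (records : List (List (String × String))), Dom_deduplicate_by_bucket records → Spec_deduplicate_by_bucket records (deduplicate_by_bucket records)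

-- ===== LEMMAS AND PROOFS =====

-- the per-bucket reduction B performs
def pvPick (l : List (List (String × String))) : List (String × String) :=
  (PySem.List.max? l (fun r => recGet r "StartTime")).getD []

def pvEntry (p : String × List (List (String × String))) : String × List (String × String) :=
  (p.1, pvPick p.2)

lemma max?_append_singleton {α κ : Type} [LinearOrder κ] (l : List α) (key : α → κ) (r : α) :
    PySem.List.max? (l ++ [r]) key =
      match PySem.List.max? l key with
      | none => some r
      | some m => if key m < key r then some r else some m := by
  simp only [PySem.List.max?, List.foldl_append]
  rfl

lemma get?_of_items_map (g : PySem.Dict String (List (List (String × String))))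
    (d : PySem.Dict String (List (String × String)))
    (h : d.items = g.items.map pvEntry) (b : String) :
    d.get? b = (g.get? b).map pvPick := by
  simp [PySem.Dict.get?, h, List.find?_map, Function.comp_def, pvEntry, Option.map_map]

-- one loop step preserves the grouping↔running-max correspondence
lemma step_preserves (g : PySem.Dict String (List (List (String × String))))
    (d : PySem.Dict String (List (String × String)))
    (h : d.items = g.items.map pvEntry)
    (hne : ∀ p ∈ g.items, p.2 ≠ [])
    (hnd : g.keys.Nodup)
    (record : List (String × String)) :
    let b := recGet record "Bucket"
    let st := recGet record "StartTime"
    let d' := match d.get? b with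
              | none => d.insert b record
              | some prev => if recGet prev "StartTime" < st then d.insert b record else d
    let g' := g.modify b [] (· ++ [record])
    d'.items = g'.items.map pvEntry ∧ (∀ p ∈ g'.items, p.2 ≠ []) ∧ g'.keys.Nodup := by
  intro b st d' g'
  have hmod : g' = g.insert b (g.getD b [] ++ [record]) := rfl
  have hget := get?_of_items_map g d h b
  refine ⟨?_, ?_, ?_⟩
  · -- items correspondence
    show d'.items = g'.items.map pvEntry
    rcases hc : g.get? b with _ | l
    · -- bucket not yet present
      have hgc : g.contains b = false := by
        rw [PySem.Dict.contains_eq_isSome_get?, hc]; rfl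
      have hdc : d.contains b = false := by
        rw [PySem.Dict.contains_eq_isSome_get?, hget, hc]; rfl
      have hd0 : d.get? b = none := by rw [hget, hc]; rfl
      have hgd : g.getD b [] = [] := PySem.Dict.getD_of_not_contains _ _ hgc
      have : d' = d.insert b record := by
        show (match d.get? b with
              | none => d.insert b record
              | some prev => if recGet prev "StartTime" < st then d.insert b record else d) = _
        rw [hd0]
      rw [this, hmod, hgd,
        PySem.Dict.items_insert_of_not_contains _ _ hdc,
        PySem.Dict.items_insert_of_not_contains _ _ hgc,
        h]
      simp [pvEntry, pvPick, PySem.List.max?]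
    · -- bucket present: l is its group so far, pick l is A's stored record
      have hgc : g.contains b = true := by
        rw [PySem.Dict.contains_eq_isSome_get?, hc]; rfl
      have hdm : d.get? b = some (pvPick l) := by rw [hget, hc]; rfl
      have hdc : d.contains b = true := by
        rw [PySem.Dict.contains_eq_isSome_get?, hdm]; rfl
      have hgd : g.getD b [] = l := by simp [PySem.Dict.getD_eq_get?_getD, hc]
      have hl : l ≠ [] := hne (b, l) (PySem.Dict.mem_items_of_get?_eq_some _ hc)
      obtain ⟨m, hm⟩ : ∃ m, PySem.List.max? l (fun r => recGet r "StartTime") = some m := by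
        cases hmx : PySem.List.max? l (fun r => recGet r "StartTime") with
        | none => exact absurd ((PySem.List.max?_eq_none_iff l _).mp hmx) hl
        | some m => exact ⟨m, rfl⟩
      have hpl : pvPick l = m := by simp [pvPick, hm]
      have hd' : d' = if recGet m "StartTime" < st then d.insert b record else d := by
        show (match d.get? b with
              | none => d.insert b record
              | some prev => if recGet prev "StartTime" < st then d.insert b record else d) = _
        rw [hdm, hpl]
      have hpapp : pvPick (l ++ [record]) = if recGet m "StartTime" < st then record else m := by
        rw [pvPick, max?_append_singleton, hm]
        dsimp only
        split_ifs <;> rfl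
      rw [hmod, hgd] at *
      by_cases hlt : recGet m "StartTime" < st
      · rw [hd', if_pos hlt, PySem.Dict.items_insert_of_contains _ _ hdc,
          PySem.Dict.items_insert_of_contains _ _ hgc, h, List.map_map, List.map_map]
        refine List.map_congr_left (fun p _ => ?_)
        by_cases hpb : p.1 = b <;> simp [pvEntry, hpb, hpapp, hlt]
      · rw [hd', if_neg hlt, PySem.Dict.items_insert_of_contains _ _ hgc, h, List.map_map]
        refine (List.map_congr_left (fun p hp => ?_)).symm
        by_cases hpb : p.1 = b
        · have hp2 : p.2 = l := by
            have := PySem.Dict.get?_of_mem_items g (k := p.1) (v := p.2) hp hnd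
            rw [hpb, hc] at this
            exact (Option.some.inj this).symm
          simp [pvEntry, hpb, hpapp, hlt, hpl, hp2]
        · simp [pvEntry, hpb]
  · -- groups stay nonempty
    intro p hp
    rw [hmod] at hp
    rcases (PySem.Dict.mem_items_insert _ _ _ _).mp hp with h1 | h1
    · subst h1; simp
    · exact hne p h1.1
  · -- keys stay nodup
    rw [hmod]; exact PySem.Dict.nodup_keys_insert _ _ _ hnd

lemma loop_eq (records : List (List (String × String)))
    (g : PySem.Dict String (List (List (String × String))))
    (d : PySem.Dict String (List (String × String)))
    (h : d.items = g.items.map pvEntry)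
    (hne : ∀ p ∈ g.items, p.2 ≠ [])
    (hnd : g.keys.Nodup) :
    (records.foldl (fun latest record =>
        let bucket := recGet record "Bucket"
        let start_time := recGet record "StartTime"
        match latest.get? bucket with
        | none => latest.insert bucket record
        | some prev => if recGet prev "StartTime" < start_time then latest.insert bucket record else latest) d).items
      = ((records.foldl (fun g record => g.modify (recGet record "Bucket") [] (· ++ [record])) g)).items.map pvEntry := by
  induction records generalizing g d with
  | nil => simpa using h
  | cons r rs ih =>
    obtain ⟨h1, h2, h3⟩ := step_preserves g d h hne hnd r
    exact ih _ _ h1 h2 h3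

-- ===== VERDICT (by name: the statement is the Claim_ definition above) =====
theorem deduplicate_by_bucket_spec : Claim_equal_deduplicate_by_bucket := by
  intro records _
  show deduplicate_by_bucket records = deduplicate_by_bucket_alt records
  unfold deduplicate_by_bucket deduplicate_by_bucket_alt
  simp only [PySem.Dict.values]
  rw [loop_eq records PySem.Dict.empty PySem.Dict.empty (by rfl) (by simp [PySem.Dict.empty]) (by simp [PySem.Dict.empty, PySem.Dict.keys])]
  simp [List.map_map, pvEntry, pvPick, Function.comp_def]
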